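-- pv_equiv track=rewrite | github.com/lgarcin/lgarcin.github.io | python/Stern.py | sternSuite
-- ===== SOURCE A (Python) =====
-- def mediante(r1, r2):
--     return tuple(map(sum, zip(r1, r2)))
--
-- def sternSuite(n):
--     u = [(0, 1), (1, 0)]
--     for _ in range(n):
--         v = [mediante(r1, r2) for (r1, r2) in zip(u[1:], u[:-1])]
--         w = [None] * (len(u) + len(v))
--         w[::2] = u
--         w[1::2] = v
--         u = w
--     return u
-- ===== SOURCE B (Python) =====
-- def sternSuite(n):
--     m = 2 ** max(n, 0)
--     c = [0, 1]
--     for k in range(2, m + 1):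
--         c.append(c[k // 2] if k % 2 == 0 else c[k // 2] + c[k // 2 + 1])
--     return list(zip(c, reversed(c)))
-- ===== Notes on version B (the rewrite author's own statement) =====
-- stated objective: alternative
-- what changed: Replaces A's repeated mediant-and-interleave doubling of the whole pair list by one linear pass of Stern's diatomic recurrence (c[k] = c[k//2] or c[k//2]+c[k//2+1]) followed by zipping the array with its reverse.
import Mathlib
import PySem

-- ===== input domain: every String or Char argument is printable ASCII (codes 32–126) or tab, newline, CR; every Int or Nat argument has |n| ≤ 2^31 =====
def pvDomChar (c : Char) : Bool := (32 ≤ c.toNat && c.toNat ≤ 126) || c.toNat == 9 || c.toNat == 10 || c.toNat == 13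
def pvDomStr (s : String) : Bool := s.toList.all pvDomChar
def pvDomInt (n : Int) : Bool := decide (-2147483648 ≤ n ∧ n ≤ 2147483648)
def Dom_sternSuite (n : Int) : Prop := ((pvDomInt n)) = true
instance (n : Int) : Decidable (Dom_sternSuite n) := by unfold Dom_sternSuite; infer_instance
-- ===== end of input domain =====

-- B replaces A's repeated mediant-and-interleave doubling of the whole list by one linear pass
-- of Stern's diatomic recurrence plus a zip with the reverse; objective: alternative algorithm.

-- ===== PORT A =====
-- mediante(r1, r2) = tuple(map(sum, zip(r1, r2))); exact for the 2-tuples A uses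
def pvMediante (r1 r2 : Int × Int) : Int × Int := (r1.1 + r2.1, r1.2 + r2.2)

-- hand port of the strided assignments w[::2] = u; w[1::2] = v (exact: in A, len v = len u - 1,
-- so w is u and v interleaved starting and ending with elements of u)
def pvInterleave {α : Type} : List α → List α → List α
  | [], ys => ys
  | x :: xs, [] => x :: xs
  | x :: xs, y :: ys => x :: y :: pvInterleave xs ys

-- one pass of A's loop body
def pvStep (u : List (Int × Int)) : List (Int × Int) :=
  let v := (List.zip (PySem.List.slice u (some 1) none) (PySem.List.slice u none (some (-1)))).map
    (fun p => pvMediante p.1 p.2)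
  pvInterleave u v

def sternSuite (n : Int) : List (Int × Int) :=
  (PySem.List.pyRange 0 n 1).foldl (fun u _ => pvStep u) [(0, 1), (1, 0)]

-- ===== PORT B =====
-- loop body of Source B: c.append(c[k//2] if k % 2 == 0 else c[k//2] + c[k//2+1])
def pvAppendStep (c : List Int) (k : Int) : List Int :=
  c ++ [if PySem.Int.mod k 2 = 0 then PySem.List.pyGetD c (PySem.Int.floordiv k 2) 0
        else PySem.List.pyGetD c (PySem.Int.floordiv k 2) 0
              + PySem.List.pyGetD c (PySem.Int.floordiv k 2 + 1) 0]

def sternSuite_alt (n : Int) : List (Int × Int) :=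
  -- m = 2 ** max(n, 0); the exponent is ≥ 0, so it is the Nat power (max n 0).toNat
  let m : Int := 2 ^ (max n 0).toNat
  let c := (PySem.List.pyRange 2 (m + 1) 1).foldl pvAppendStep [0, 1]
  -- list(zip(c, reversed(c)))
  List.zip c c.reverse

-- ===== PRECONDITION & SPEC =====
def Spec_sternSuite (n : Int) (out : List (Int × Int)) : Prop := out = sternSuite_alt n
instance (n : Int) (out : List (Int × Int)) : Decidable (Spec_sternSuite n out) := by unfold Spec_sternSuite; infer_instance

-- ===== CLAIM (what is proved, stated in full; the proofs are below) =====
def Claim_equal_sternSuite : Prop := ∀ (n : Int), Dom_sternSuite n → Spec_sternSuite n (sternSuite n)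

-- ===== LEMMAS AND PROOFS =====

-- Stern's diatomic sequence, the common description of both ports' results
def pvStern : Nat → Int
  | 0 => 0
  | 1 => 1
  | k + 2 =>
    if _h : (k + 2) % 2 = 0 then pvStern ((k + 2) / 2)
    else pvStern ((k + 2) / 2) + pvStern ((k + 2) / 2 + 1)
decreasing_by all_goals omega

lemma pvStern_two_mul (k : Nat) : pvStern (2 * k) = pvStern k := by
  match k with
  | 0 => rfl
  | k + 1 =>
    have h : 2 * (k + 1) = 2 * k + 2 := by ring
    rw [h, pvStern]
    have h2 : (2 * k + 2) % 2 = 0 := by omega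
    simp only [h2, dite_true]
    congr 1
    omega

lemma pvStern_two_mul_add_one (k : Nat) : pvStern (2 * k + 1) = pvStern k + pvStern (k + 1) := by
  match k with
  | 0 => simp [pvStern]
  | k + 1 =>
    have h : 2 * (k + 1) + 1 = (2 * k + 1) + 2 := by ring
    rw [h, pvStern]
    have h2 : ((2 * k + 1) + 2) % 2 ≠ 0 := by omega
    simp only [h2, reduceDIte]
    have h3 : (2 * k + 1 + 2) / 2 = k + 1 := by omega
    rw [h3]

lemma map_range_succ_cons {α : Type} (f : Nat → α) (n : Nat) :
    (List.range (n + 1)).map f = f 0 :: (List.range n).map (fun i => f (i + 1)) := by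
  rw [List.range_succ_eq_map]
  simp [List.map_map, Function.comp, Nat.succ_eq_add_one]

lemma pvInterleave_map_range {α : Type} (m : Nat) (f g : Nat → α) :
    pvInterleave ((List.range (m + 1)).map f) ((List.range m).map g)
      = (List.range (2 * m + 1)).map (fun i => if i % 2 = 0 then f (i / 2) else g (i / 2)) := by
  induction m generalizing f g with
  | zero => simp [pvInterleave]
  | succ m ih =>
    rw [map_range_succ_cons f (m + 1), map_range_succ_cons g m, pvInterleave, ih]
    have hrw : 2 * (m + 1) + 1 = (2 * m + 1) + 1 + 1 := by ring
    rw [hrw, map_range_succ_cons _ ((2 * m + 1) + 1), map_range_succ_cons _ (2 * m + 1)]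
    norm_num
    intro i _
    have h1 : (i + 1 + 1) % 2 = i % 2 := by omega
    have h2 : (i + 1 + 1) / 2 = i / 2 + 1 := by omega
    rw [h1, h2]

lemma pvStep_map (m : Nat) :
    pvStep ((List.range (m + 1)).map (fun i => (pvStern i, pvStern (m - i))))
      = (List.range (2 * m + 1)).map (fun i => (pvStern i, pvStern (2 * m - i))) := by
  set f : Nat → Int × Int := fun i => (pvStern i, pvStern (m - i)) with hf
  unfold pvStep
  rw [PySem.List.slice_from_one, PySem.List.slice_to_neg_one]
  have htail : ((List.range (m + 1)).map f).tail = (List.range m).map (fun i => f (i + 1)) := by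
    rw [List.range_succ_eq_map]
    simp [List.map_map, Function.comp]
  have hlast : ((List.range (m + 1)).map f).dropLast = (List.range m).map f := by
    rw [List.range_succ]
    simp
  rw [htail, hlast, List.zip_map']
  simp only [List.map_map]
  have hv : (fun p : (Int × Int) × (Int × Int) => pvMediante p.1 p.2) ∘ (fun x => (f (x + 1), f x))
      = fun i => pvMediante (f (i + 1)) (f i) := rfl
  rw [hv, pvInterleave_map_range m f (fun i => pvMediante (f (i + 1)) (f i))]
  apply List.map_congr_left
  intro i hi
  rw [List.mem_range] at hi
  by_cases hpar : i % 2 = 0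
  · simp only [hpar, if_true]
    have hk : i = 2 * (i / 2) := by omega
    have hsub : 2 * m - i = 2 * (m - i / 2) := by omega
    rw [hf]
    simp only []
    rw [show (pvStern i, pvStern (2 * m - i)) = (pvStern (2 * (i / 2)), pvStern (2 * (m - i / 2))) by rw [← hk, ← hsub]]
    rw [pvStern_two_mul, pvStern_two_mul]
  · simp only [hpar, if_false]
    have hk : i = 2 * (i / 2) + 1 := by omega
    have hklt : i / 2 < m := by omega
    rw [hf]
    simp only [pvMediante]
    have h1 : pvStern i = pvStern (i / 2) + pvStern (i / 2 + 1) := by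
      nth_rewrite 1 [hk]
      exact pvStern_two_mul_add_one (i / 2)
    have h2 : pvStern (2 * m - i) = pvStern (m - (i / 2 + 1)) + pvStern (m - i / 2) := by
      rw [show 2 * m - i = 2 * (m - (i / 2 + 1)) + 1 from by omega, pvStern_two_mul_add_one,
        show m - (i / 2 + 1) + 1 = m - i / 2 from by omega]
    rw [h1, h2]
    simp [add_comm]

lemma pvStep_iterate (j : Nat) :
    pvStep^[j] [((0 : Int), (1 : Int)), (1, 0)]
      = (List.range (2 ^ j + 1)).map (fun i => (pvStern i, pvStern (2 ^ j - i))) := by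
  induction j with
  | zero =>
    simp [List.range_succ]
    constructor <;> simp [pvStern]
  | succ j ih =>
    rw [Function.iterate_succ_apply', ih, pvStep_map]
    have : 2 * 2 ^ j = 2 ^ (j + 1) := by ring
    rw [this]

lemma foldl_const_step (l : List Int) (u : List (Int × Int)) :
    l.foldl (fun u _ => pvStep u) u = pvStep^[l.length] u := by
  induction l generalizing u with
  | nil => rfl
  | cons a l ih =>
    rw [List.foldl_cons, ih, List.length_cons, Function.iterate_succ_apply]

-- B's loop builds exactly the first j+2 values of Stern's sequence
lemma pvBuild (j : Nat) :
    (PySem.List.pyRange 2 (((j : Int) + 1) + 1) 1).foldl pvAppendStep [0, 1]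
      = (List.range (j + 2)).map pvStern := by
  induction j with
  | zero =>
    have h0 : PySem.List.pyRange 2 (((0 : Nat) : Int) + 1 + 1) 1 = [] := by
      rw [show ((0 : Nat) : Int) + 1 + 1 = 2 from by norm_num]
      exact PySem.List.pyRange_one_eq_nil (by omega)
    rw [h0]
    simp [List.range_succ]
    constructor <;> simp [pvStern]
  | succ j ih =>
    have hsplit : PySem.List.pyRange 2 ((((j + 1 : Nat) : Int) + 1) + 1) 1
        = PySem.List.pyRange 2 (((j : Int) + 1) + 1) 1 ++ [((j : Int) + 1) + 1] := by
      push_cast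
      rw [show (j : Int) + 1 + 1 + 1 = ((j : Int) + 1 + 1) + 1 from by ring]
      exact PySem.List.pyRange_one_succ_right (by omega)
    rw [hsplit, List.foldl_append, ih]
    simp only [List.foldl_cons, List.foldl_nil]
    -- the appended element equals pvStern (j+2)
    have hK : ((j : Int) + 1) + 1 = ((j + 2 : Nat) : Int) := by push_cast; ring
    rw [hK]
    unfold pvAppendStep
    rw [show PySem.Int.mod ((j + 2 : Nat) : Int) 2 = (((j + 2) % 2 : Nat) : Int) from by
          rw [PySem.Int.mod_eq_emod_of_pos (by norm_num)]; omega,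
        show PySem.Int.floordiv ((j + 2 : Nat) : Int) 2 = (((j + 2) / 2 : Nat) : Int) from by
          rw [PySem.Int.floordiv_eq_ediv_of_pos (by norm_num)]; omega]
    have hlen : ((List.range (j + 2)).map pvStern).length = j + 2 := by simp
    have hq : (j + 2) / 2 < j + 2 := by omega
    have hget : PySem.List.pyGetD ((List.range (j + 2)).map pvStern) (((j + 2) / 2 : Nat) : Int) 0
        = pvStern ((j + 2) / 2) := by
      rw [PySem.List.pyGetD_natCast, List.getD_eq_getElem _ _ (by simpa using hq)]
      simp
    have hRHS : (List.range (j + 1 + 2)).map pvStern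
        = (List.range (j + 2)).map pvStern ++ [pvStern (j + 2)] := by
      rw [show j + 1 + 2 = (j + 2) + 1 from by ring, List.range_succ]
      simp
    rw [hRHS]
    congr 1
    by_cases hpar : (j + 2) % 2 = 0
    · rw [if_pos (by exact_mod_cast congrArg (Nat.cast : Nat → Int) hpar), hget]
      rw [pvStern]
      simp only [hpar, dite_true]
    · have hparI : ¬ (((j + 2) % 2 : Nat) : Int) = 0 := by
        intro h; exact hpar (by exact_mod_cast h)
      rw [if_neg hparI, hget]
      have hq1 : (j + 2) / 2 + 1 < j + 2 := by omega
      have hcast : (((j + 2) / 2 : Nat) : Int) + 1 = (((j + 2) / 2 + 1 : Nat) : Int) := by push_cast; ring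
      have hget1 : PySem.List.pyGetD ((List.range (j + 2)).map pvStern) ((((j + 2) / 2 + 1 : Nat)) : Int) 0
          = pvStern ((j + 2) / 2 + 1) := by
        rw [PySem.List.pyGetD_natCast, List.getD_eq_getElem _ _ (by simpa using hq1)]
        simp
      rw [hcast, hget1]
      rw [pvStern]
      simp only [hpar, reduceDIte]

-- zipping the Stern list with its reverse pairs index i with index m - i
lemma pvZipReverse (m : Nat) :
    List.zip ((List.range (m + 1)).map pvStern) ((List.range (m + 1)).map pvStern).reverse
      = (List.range (m + 1)).map (fun i => (pvStern i, pvStern (m - i))) := by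
  apply List.ext_getElem
  · simp
  · intro i h1 h2
    have hi : i < m + 1 := by simpa using h2
    have hlen : ((List.range (m + 1)).map pvStern).length = m + 1 := by simp
    rw [List.getElem_zip, List.getElem_reverse]
    simp only [List.getElem_map, List.getElem_range, hlen]
    have : m + 1 - 1 - i = m - i := by omega
    rw [this]

-- ===== VERDICT (by name: the statement is the Claim_ definition above) =====
theorem sternSuite_spec : Claim_equal_sternSuite := by
  intro n _
  unfold Spec_sternSuite sternSuite sternSuite_alt
  rw [foldl_const_step, PySem.List.length_pyRange_one]
  have hmax : (max n 0).toNat = (n - 0).toNat := by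
    rcases le_total n 0 with h | h
    · rw [max_eq_right h]; omega
    · rw [max_eq_left h]; omega
  rw [← hmax]
  set M : Nat := (max n 0).toNat with hM
  have hpow : (2 : Int) ^ M = ((2 ^ M : Nat) : Int) := by push_cast; ring
  have hm1 : 2 ^ M = (2 ^ M - 1) + 1 := by
    have : 1 ≤ 2 ^ M := Nat.one_le_two_pow
    omega
  have hbuild := pvBuild (2 ^ M - 1)
  rw [show (((2 ^ M - 1 : Nat) : Int) + 1) + 1 = ((2 ^ M : Nat) : Int) + 1 from by
    push_cast [hm1.symm]; omega] at hbuild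
  rw [show (2 ^ M - 1) + 2 = 2 ^ M + 1 from by omega] at hbuild
  simp only [hpow, hbuild, pvZipReverse, pvStep_iterate M]
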